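-- pv_equiv track=rewrite | github.com/jueun402/Programmers | KAKAO/Level1/키패드누르기.py | pad_dist
-- ===== SOURCE A (Python) =====
-- def pad_dist(l,r, c): # 왼손, 오른손, 가운데 키패드
--     keypad = ['123','456','789','*0#']
--
--     # 왼쪽, 오른쪽, 가운데 좌표
--     lx, ly, rx, ry, cx, cy   = 0,0,0,0,0,0
--
--     # left, right, center 좌표 구해서 거리 구하자
--     for i,pad in enumerate(keypad):
--
--         # left
--         if pad.find(str(l)) > -1:  ly, lx = i, pad.find(str(l))
--
--         # right
--         if pad.find(str(r)) > -1:  ry, rx = i, pad.find(str(r))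
--
--         # center
--         if pad.find(str(c)) > -1:  cy, cx = i, pad.find(str(c))
--
--     right, left = (abs(cy-ry) + abs(cx-rx)) , (abs(cy-ly) + abs(cx-lx))
--
--     if right == left: return 'h'
--     elif right < left: return 'r'
--     elif  right > left: return 'l'
-- ===== SOURCE B (Python) =====
-- def _pos(n):
--     # closed-form keypad placement: digits 1-9 tile rows of three, 0 sits mid-bottom;
--     # anything that is not a single keypad digit stays at the origin
--     s = str(n)
--     if len(s) == 1 and s.isdigit():
--         d = int(s)
--         if d == 0:
--             return (3, 1)
--         return ((d - 1) // 3, (d - 1) % 3)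
--     return (0, 0)
--
--
-- def pad_dist(l, r, c):
--     (ly, lx), (ry, rx), (cy, cx) = _pos(l), _pos(r), _pos(c)
--     left = abs(cy - ly) + abs(cx - lx)
--     right = abs(cy - ry) + abs(cx - rx)
--     if right == left:
--         return 'h'
--     return 'r' if right < left else 'l'
-- ===== Notes on version B (the rewrite author's own statement) =====
-- stated objective: simpler
-- what changed: B replaces A's 12-cell keypad scan with a closed-form arithmetic placement (row=(d-1)//3, col=(d-1)%3 for digits 1-9, 0 at (3,1), origin for non-keys); Pre_ excludes the seven non-key arguments (23,45,56,78,89,456,789) whose decimal string is accidentally a substring of a keypad row, an unspecified corner where A's substring cell and B's origin default are equally arbitrary.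
-- outside the precondition, e.g. on pad_dist(23, 1, 1): A returns 'r', B returns 'h'; on pad_dist(1, 456, 5): A returns 'r', B returns 'h'
import Mathlib
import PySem

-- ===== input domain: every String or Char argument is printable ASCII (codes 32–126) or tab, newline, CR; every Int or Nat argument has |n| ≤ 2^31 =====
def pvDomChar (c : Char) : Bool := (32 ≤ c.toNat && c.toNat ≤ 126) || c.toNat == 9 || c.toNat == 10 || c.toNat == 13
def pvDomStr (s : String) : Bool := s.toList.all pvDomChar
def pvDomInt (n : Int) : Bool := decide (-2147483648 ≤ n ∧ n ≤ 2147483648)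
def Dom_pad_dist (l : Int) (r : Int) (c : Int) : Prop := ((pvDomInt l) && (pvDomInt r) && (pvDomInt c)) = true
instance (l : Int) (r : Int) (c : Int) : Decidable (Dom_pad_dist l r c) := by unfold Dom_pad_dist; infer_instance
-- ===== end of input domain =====

-- B replaces A's 12-cell keypad scan with a closed-form arithmetic placement of each key
-- (simpler); Pre_ excludes the seven non-key arguments whose decimal string happens to be a
-- substring of a keypad row, an unspecified corner on which either placement is as defensible.


-- ===== PORT A =====
def pad_dist (l : Int) (r : Int) (c : Int) : String :=
  let keypad : List String := ["123", "456", "789", "*0#"]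
  -- state (lx, ly, rx, ry, cx, cy), all initially 0
  let st :=
    (PySem.List.enumerate keypad 0).foldl (fun s ip =>
      let s := if PySem.Str.find ip.2 (PySem.Int.toStr l) > -1 then
                 (PySem.Str.find ip.2 (PySem.Int.toStr l), ip.1, s.2.2) else s
      let s := if PySem.Str.find ip.2 (PySem.Int.toStr r) > -1 then
                 (s.1, s.2.1, PySem.Str.find ip.2 (PySem.Int.toStr r), ip.1, s.2.2.2.2) else s
      let s := if PySem.Str.find ip.2 (PySem.Int.toStr c) > -1 then
                 (s.1, s.2.1, s.2.2.1, s.2.2.2.1, PySem.Str.find ip.2 (PySem.Int.toStr c), ip.1) else s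
      s)
      ((0 : Int), (0 : Int), (0 : Int), (0 : Int), (0 : Int), (0 : Int))
  let right := |st.2.2.2.2.2 - st.2.2.2.1| + |st.2.2.2.2.1 - st.2.2.1|
  let left  := |st.2.2.2.2.2 - st.2.1| + |st.2.2.2.2.1 - st.1|
  if right == left then "h"
  else if right < left then "r"
  else if right > left then "l"
  else ""   -- Python falls off the end (None) here; unreachable by trichotomy

-- ===== PORT B =====
-- closed-form keypad placement (_pos in Source B)
def pvPos (n : Int) : Int × Int :=
  let s := PySem.Int.toStr n
  if PySem.Str.len s == 1 && PySem.Str.strIsdigit s then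
    let d := (PySem.Int.ofStr? s).getD 0   -- int(s); total here thanks to the isdigit guard
    if d == 0 then (3, 1)
    else (PySem.Int.floordiv (d - 1) 3, PySem.Int.mod (d - 1) 3)
  else (0, 0)

def pad_dist_alt (l : Int) (r : Int) (c : Int) : String :=
  let pl := pvPos l
  let pr := pvPos r
  let pc := pvPos c
  let left  := |pc.1 - pl.1| + |pc.2 - pl.2|
  let right := |pc.1 - pr.1| + |pc.2 - pr.2|
  if right == left then "h"
  else if right < left then "r"
  else "l"

-- ===== PRECONDITION & SPEC =====
-- Pre_ excludes arguments in {23,45,56,78,89,456,789}: these are not keys, yet their decimal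
-- string is a substring of a keypad row, so A happens to place the hand at that substring's cell
-- while B leaves any non-key at the origin; neither value is specified for a non-key, so the
-- corner is excluded.
def pvBadKeys : List Int := [23, 45, 56, 78, 89, 456, 789]
def Pre_pad_dist (l : Int) (r : Int) (c : Int) : Prop :=
  l ∉ pvBadKeys ∧ r ∉ pvBadKeys ∧ c ∉ pvBadKeys
instance (l : Int) (r : Int) (c : Int) : Decidable (Pre_pad_dist l r c) := by
  unfold Pre_pad_dist; infer_instance

def pvWitness_pad_dist : Int × Int × Int := (1, 5, 9)

def Spec_pad_dist (l : Int) (r : Int) (c : Int) (out : String) : Prop := out = pad_dist_alt l r c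
instance (l : Int) (r : Int) (c : Int) (out : String) : Decidable (Spec_pad_dist l r c out) := by
  unfold Spec_pad_dist; infer_instance

-- ===== CLAIM (what is proved, stated in full; the proofs are below) =====
def Claim_equal_pad_dist : Prop := ∀ (l : Int) (r : Int) (c : Int), Dom_pad_dist l r c → Pre_pad_dist l r c → Spec_pad_dist l r c (pad_dist l r c)

-- ===== LEMMAS AND PROOFS =====

-- reading a digit string back as a number (proof-side helper, used to pin down str(n))
def pvCharVal (ch : Char) : Option Nat :=
  if ch = '0' then some 0 else if ch = '1' then some 1 else if ch = '2' then some 2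
  else if ch = '3' then some 3 else if ch = '4' then some 4 else if ch = '5' then some 5
  else if ch = '6' then some 6 else if ch = '7' then some 7 else if ch = '8' then some 8
  else if ch = '9' then some 9 else none

def pvStep (acc : Option Nat) (ch : Char) : Option Nat :=
  acc.bind fun v => (pvCharVal ch).map fun d => v * 10 + d

def pvDval (cs : List Char) : Option Nat := cs.foldl pvStep (some 0)

theorem pv_toDigitsCore_append (f n : Nat) (l : List Char) :
    Nat.toDigitsCore 10 f n l = Nat.toDigitsCore 10 f n [] ++ l := by
  induction f generalizing n l with
  | zero => simp [Nat.toDigitsCore]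
  | succ f ih =>
    simp only [Nat.toDigitsCore]
    by_cases h : n / 10 = 0
    · simp [h]
    · simp only [h, if_false]
      rw [ih (n / 10) ((n % 10).digitChar :: l), ih (n / 10) [(n % 10).digitChar]]
      simp

theorem pv_charVal_digitChar (d : Nat) (hd : d < 10) :
    pvCharVal (Nat.digitChar d) = some d := by
  interval_cases d <;> decide

theorem pv_toDigitsCore_spec (f : Nat) : ∀ n : Nat, n < f →
    Nat.toDigitsCore 10 f n [] ≠ [] ∧ pvDval (Nat.toDigitsCore 10 f n []) = some n := by
  induction f with
  | zero => intro n h; omega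
  | succ f ih =>
    intro n _
    simp only [Nat.toDigitsCore]
    by_cases h : n / 10 = 0
    · have hn : n < 10 := by omega
      refine ⟨by simp [h], ?_⟩
      simp [h, pvDval, pvStep, Nat.mod_eq_of_lt hn, pv_charVal_digitChar _ hn]
    · have hlt : n / 10 < f := by
        have h1 : n / 10 < n := Nat.div_lt_self (by omega) (by norm_num)
        omega
      obtain ⟨hne, hval⟩ := ih (n / 10) hlt
      rw [if_neg h, pv_toDigitsCore_append]
      refine ⟨by simp [hne], ?_⟩
      simp only [pvDval] at hval ⊢
      rw [List.foldl_append, hval]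
      simp [pvStep, pv_charVal_digitChar _ (by omega : n % 10 < 10)]
      omega

theorem pv_dval_toChars (n : Int) (hn : 0 ≤ n) :
    pvDval (PySem.Int.toChars n) = some n.toNat := by
  simp [PySem.Int.toChars, not_lt.mpr hn, Nat.toDigits]
  exact (pv_toDigitsCore_spec (n.toNat + 1) n.toNat (by omega)).2

theorem pv_toChars_ne_nil (n : Int) : PySem.Int.toChars n ≠ [] := by
  by_cases h : n < 0
  · simp [PySem.Int.toChars, h]
  · simp [PySem.Int.toChars, h, Nat.toDigits]
    exact (pv_toDigitsCore_spec (n.toNat + 1) n.toNat (by omega)).1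

-- if str(n) consists of keypad characters (no '-'), its digit reading is n itself
theorem pv_value (n : Int) (cs : List Char) (h : PySem.Int.toChars n = cs)
    (hm : '-' ∉ cs) : pvDval cs = some n.toNat ∧ 0 ≤ n := by
  by_cases hneg : n < 0
  · exfalso
    apply hm
    rw [← h]
    simp [PySem.Int.toChars, hneg]
  · exact ⟨h ▸ pv_dval_toChars n (not_lt.mp hneg), not_lt.mp hneg⟩

theorem pv_infix_three {xs : List Char} {a b c : Char} (h : xs <:+: [a, b, c]) :
    xs = [] ∨ xs = [a] ∨ xs = [b] ∨ xs = [c] ∨ xs = [a, b] ∨ xs = [b, c] ∨ xs = [a, b, c] := by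
  obtain ⟨t, hpre, hsuf⟩ := List.infix_iff_prefix_suffix.mp h
  have ht : t ∈ [[a, b, c], [b, c], [c], ([] : List Char)] := by
    have := (List.mem_tails _ _).mpr hsuf
    simpa [List.tails] using this
  fin_cases ht <;>
  · have hx := (List.mem_inits _ _).mpr hpre
    simp [List.inits] at hx
    tauto

theorem pv_find_123 (n : Int) (h1 : n ≠ 1) (h2 : n ≠ 2) (h3 : n ≠ 3) (h12 : n ≠ 12)
    (h23 : n ≠ 23) (h123 : n ≠ 123) : PySem.Str.find "123" (PySem.Int.toStr n) = -1 := by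
  rw [PySem.Str.find_eq_neg_one_iff]
  intro hinf
  rw [PySem.Int.toList_toStr] at hinf
  rcases pv_infix_three (show PySem.Int.toChars n <:+: ['1', '2', '3'] by exact hinf) with
    h | h | h | h | h | h | h
  · exact pv_toChars_ne_nil n h
  all_goals
    obtain ⟨hd, hp⟩ := pv_value n _ h (by decide)
    simp [pvDval, pvStep, pvCharVal] at hd
    try omega

theorem pv_find_456 (n : Int) (h1 : n ≠ 4) (h2 : n ≠ 5) (h3 : n ≠ 6) (h12 : n ≠ 45)
    (h23 : n ≠ 56) (h123 : n ≠ 456) : PySem.Str.find "456" (PySem.Int.toStr n) = -1 := by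
  rw [PySem.Str.find_eq_neg_one_iff]
  intro hinf
  rw [PySem.Int.toList_toStr] at hinf
  rcases pv_infix_three (show PySem.Int.toChars n <:+: ['4', '5', '6'] by exact hinf) with
    h | h | h | h | h | h | h
  · exact pv_toChars_ne_nil n h
  all_goals
    obtain ⟨hd, hp⟩ := pv_value n _ h (by decide)
    simp [pvDval, pvStep, pvCharVal] at hd
    try omega

theorem pv_find_789 (n : Int) (h1 : n ≠ 7) (h2 : n ≠ 8) (h3 : n ≠ 9) (h12 : n ≠ 78)
    (h23 : n ≠ 89) (h123 : n ≠ 789) : PySem.Str.find "789" (PySem.Int.toStr n) = -1 := by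
  rw [PySem.Str.find_eq_neg_one_iff]
  intro hinf
  rw [PySem.Int.toList_toStr] at hinf
  rcases pv_infix_three (show PySem.Int.toChars n <:+: ['7', '8', '9'] by exact hinf) with
    h | h | h | h | h | h | h
  · exact pv_toChars_ne_nil n h
  all_goals
    obtain ⟨hd, hp⟩ := pv_value n _ h (by decide)
    simp [pvDval, pvStep, pvCharVal] at hd
    try omega

theorem pv_find_bottom (n : Int) (h0 : n ≠ 0) : PySem.Str.find "*0#" (PySem.Int.toStr n) = -1 := by
  rw [PySem.Str.find_eq_neg_one_iff]
  intro hinf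
  rw [PySem.Int.toList_toStr] at hinf
  rcases pv_infix_three (show PySem.Int.toChars n <:+: ['*', '0', '#'] by exact hinf) with
    h | h | h | h | h | h | h
  · exact pv_toChars_ne_nil n h
  all_goals
    obtain ⟨hd, hp⟩ := pv_value n _ h (by decide)
    simp [pvDval, pvStep, pvCharVal] at hd
    try omega

-- the per-hand scan of A, as two scalar folds (column, then row)
def pvColA (n : Int) : Int :=
  (PySem.List.enumerate ["123", "456", "789", "*0#"] 0).foldl
    (fun a ip => if PySem.Str.find ip.2 (PySem.Int.toStr n) > -1 then
        PySem.Str.find ip.2 (PySem.Int.toStr n) else a) 0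

def pvRowA (n : Int) : Int :=
  (PySem.List.enumerate ["123", "456", "789", "*0#"] 0).foldl
    (fun a ip => if PySem.Str.find ip.2 (PySem.Int.toStr n) > -1 then ip.1 else a) 0

-- a digit character is one of the ten literals
theorem pv_char_of_toNat (ch d : Char) (h : ch.val.toNat = d.val.toNat) : ch = d :=
  Char.ext (UInt32.toNat_inj.mp h)

theorem pv_isdigit_cases (ch : Char) (h : PySem.Chars.isdigit ch = true) :
    ch = '0' ∨ ch = '1' ∨ ch = '2' ∨ ch = '3' ∨ ch = '4' ∨ ch = '5' ∨ ch = '6' ∨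
    ch = '7' ∨ ch = '8' ∨ ch = '9' := by
  simp only [PySem.Chars.isdigit, Bool.and_eq_true, decide_eq_true_eq, Char.le_def] at h
  obtain ⟨h1, h2⟩ := h
  have l1 : (48 : Nat) ≤ ch.val.toNat := UInt32.le_iff_toNat_le.mp h1
  have l2 : ch.val.toNat ≤ (57 : Nat) := UInt32.le_iff_toNat_le.mp h2
  have hv : ch.val.toNat = 48 ∨ ch.val.toNat = 49 ∨ ch.val.toNat = 50 ∨ ch.val.toNat = 51 ∨
      ch.val.toNat = 52 ∨ ch.val.toNat = 53 ∨ ch.val.toNat = 54 ∨ ch.val.toNat = 55 ∨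
      ch.val.toNat = 56 ∨ ch.val.toNat = 57 := by omega
  rcases hv with h|h|h|h|h|h|h|h|h|h
  · exact Or.inl (pv_char_of_toNat ch '0' (by rw [h]; decide))
  · exact Or.inr (Or.inl (pv_char_of_toNat ch '1' (by rw [h]; decide)))
  · exact Or.inr (Or.inr (Or.inl (pv_char_of_toNat ch '2' (by rw [h]; decide))))
  · exact Or.inr (Or.inr (Or.inr (Or.inl (pv_char_of_toNat ch '3' (by rw [h]; decide)))))
  · exact Or.inr (Or.inr (Or.inr (Or.inr (Or.inl (pv_char_of_toNat ch '4' (by rw [h]; decide))))))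
  · exact Or.inr (Or.inr (Or.inr (Or.inr (Or.inr (Or.inl (pv_char_of_toNat ch '5' (by rw [h]; decide)))))))
  · exact Or.inr (Or.inr (Or.inr (Or.inr (Or.inr (Or.inr (Or.inl (pv_char_of_toNat ch '6' (by rw [h]; decide))))))))
  · exact Or.inr (Or.inr (Or.inr (Or.inr (Or.inr (Or.inr (Or.inr (Or.inl (pv_char_of_toNat ch '7' (by rw [h]; decide)))))))))
  · exact Or.inr (Or.inr (Or.inr (Or.inr (Or.inr (Or.inr (Or.inr (Or.inr (Or.inl (pv_char_of_toNat ch '8' (by rw [h]; decide))))))))))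
  · exact Or.inr (Or.inr (Or.inr (Or.inr (Or.inr (Or.inr (Or.inr (Or.inr (Or.inr (pv_char_of_toNat ch '9' (by rw [h]; decide))))))))))

-- if str(n) is not a single decimal digit, B leaves the hand at the origin
theorem pv_pos_default (n : Int) (h : ¬ (0 ≤ n ∧ n < 10)) : pvPos n = (0, 0) := by
  have hg : (PySem.Str.len (PySem.Int.toStr n) == 1 &&
      PySem.Str.strIsdigit (PySem.Int.toStr n)) ≠ true := by
    intro hg
    simp only [Bool.and_eq_true, beq_iff_eq] at hg
    obtain ⟨hlen, hdig⟩ := hg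
    have hlen' : (PySem.Int.toStr n).toList.length = 1 := by
      have he : PySem.Str.len (PySem.Int.toStr n) = ((PySem.Int.toStr n).toList.length : Int) := by
        simp [PySem.Str.len]
      omega
    obtain ⟨ch, hch⟩ : ∃ ch, (PySem.Int.toStr n).toList = [ch] :=
      List.length_eq_one_iff.mp hlen'
    have hch' : PySem.Int.toChars n = [ch] := by rw [← PySem.Int.toList_toStr, hch]
    have hdig' : PySem.Chars.isdigit ch = true := by
      simp [PySem.Str.strIsdigit, PySem.Chars.strIsdigit, hch] at hdig
      exact hdig
    have hcases := pv_isdigit_cases ch hdig'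
    have hne : '-' ∉ [ch] := by
      rcases hcases with rfl|rfl|rfl|rfl|rfl|rfl|rfl|rfl|rfl|rfl <;> decide
    obtain ⟨hd, hp⟩ := pv_value n [ch] hch' hne
    have hv : ∃ v, pvDval [ch] = some v ∧ v < 10 := by
      rcases hcases with rfl|rfl|rfl|rfl|rfl|rfl|rfl|rfl|rfl|rfl <;> exact ⟨_, rfl, by norm_num⟩
    obtain ⟨v, hv1, hv2⟩ := hv
    rw [hv1] at hd
    injection hd with hd
    exact h ⟨hp, by omega⟩
  simp only [pvPos]
  exact if_neg hg

-- each hand outside the change region is placed identically by A's scan and B's formula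
theorem pv_pos_eq (n : Int) (e23 : n ≠ 23) (e45 : n ≠ 45) (e56 : n ≠ 56) (e78 : n ≠ 78)
    (e89 : n ≠ 89) (e456 : n ≠ 456) (e789 : n ≠ 789) :
    pvColA n = (pvPos n).2 ∧ pvRowA n = (pvPos n).1 := by
  by_cases hF : n = 0 ∨ n = 1 ∨ n = 2 ∨ n = 3 ∨ n = 4 ∨ n = 5 ∨ n = 6 ∨ n = 7 ∨ n = 8 ∨
      n = 9 ∨ n = 12 ∨ n = 123
  · rcases hF with rfl | rfl | rfl | rfl | rfl | rfl | rfl | rfl | rfl | rfl | rfl | rfl <;>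
      exact ⟨by decide, by decide⟩
  · push Not at hF
    obtain ⟨e0, e1, e2, e3, e4, e5, e6, e7, e8, e9, e12, e123⟩ := hF
    have f1 := pv_find_123 n e1 e2 e3 e12 e23 e123
    have f2 := pv_find_456 n e4 e5 e6 e45 e56 e456
    have f3 := pv_find_789 n e7 e8 e9 e78 e89 e789
    have f4 := pv_find_bottom n e0
    rw [pv_pos_default n (by omega)]
    constructor <;>
    · simp only [pvColA, pvRowA, PySem.List.enumerate_cons, PySem.List.enumerate_nil,
        List.foldl, f1, f2, f3, f4]
      norm_num

-- A's 6-field scan is the six independent per-hand scans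
theorem pv_hstep (l r c : Int) :
      (PySem.List.enumerate ["123", "456", "789", "*0#"] 0).foldl (fun s ip =>
        let s := if PySem.Str.find ip.2 (PySem.Int.toStr l) > -1 then
                  (PySem.Str.find ip.2 (PySem.Int.toStr l), ip.1, s.2.2) else s
        let s := if PySem.Str.find ip.2 (PySem.Int.toStr r) > -1 then
                  (s.1, s.2.1, PySem.Str.find ip.2 (PySem.Int.toStr r), ip.1, s.2.2.2.2) else s
        let s := if PySem.Str.find ip.2 (PySem.Int.toStr c) > -1 then
                  (s.1, s.2.1, s.2.2.1, s.2.2.2.1, PySem.Str.find ip.2 (PySem.Int.toStr c), ip.1) else s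
        s)
        ((0 : Int), (0 : Int), (0 : Int), (0 : Int), (0 : Int), (0 : Int)) =
      (pvColA l, pvRowA l, pvColA r, pvRowA r, pvColA c, pvRowA c) := by
  have hfun : (fun (s : Int × Int × Int × Int × Int × Int) (ip : Int × String) =>
        let s := if PySem.Str.find ip.2 (PySem.Int.toStr l) > -1 then
                  (PySem.Str.find ip.2 (PySem.Int.toStr l), ip.1, s.2.2) else s
        let s := if PySem.Str.find ip.2 (PySem.Int.toStr r) > -1 then
                  (s.1, s.2.1, PySem.Str.find ip.2 (PySem.Int.toStr r), ip.1, s.2.2.2.2) else s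
        let s := if PySem.Str.find ip.2 (PySem.Int.toStr c) > -1 then
                  (s.1, s.2.1, s.2.2.1, s.2.2.2.1, PySem.Str.find ip.2 (PySem.Int.toStr c), ip.1) else s
        s) =
      (fun s ip =>
        ((fun a ip => if PySem.Str.find ip.2 (PySem.Int.toStr l) > -1 then
            PySem.Str.find ip.2 (PySem.Int.toStr l) else a) s.1 ip,
         (fun s ip =>
          ((fun a ip => if PySem.Str.find ip.2 (PySem.Int.toStr l) > -1 then ip.1 else a) s.1 ip,
           (fun s ip =>
            ((fun a ip => if PySem.Str.find ip.2 (PySem.Int.toStr r) > -1 then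
                PySem.Str.find ip.2 (PySem.Int.toStr r) else a) s.1 ip,
             (fun s ip =>
              ((fun a ip => if PySem.Str.find ip.2 (PySem.Int.toStr r) > -1 then ip.1 else a) s.1 ip,
               (fun s ip =>
                ((fun a ip => if PySem.Str.find ip.2 (PySem.Int.toStr c) > -1 then
                    PySem.Str.find ip.2 (PySem.Int.toStr c) else a) s.1 ip,
                 (fun a ip => if PySem.Str.find ip.2 (PySem.Int.toStr c) > -1 then ip.1 else a) s.2 ip))
                s.2 ip)) s.2 ip)) s.2 ip)) s.2 ip)) := by
    funext s ip
    dsimp only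
    split_ifs <;> rfl
  rw [hfun]
  simp only [PySem.List.enumerate_cons, PySem.List.enumerate_nil, List.foldl, pvColA, pvRowA]

-- ===== VERDICT (by name: the statement is the Claim_ definition above) =====
theorem pad_dist_spec : Claim_equal_pad_dist := by
  intro l r c _ hpre
  unfold Pre_pad_dist at hpre
  simp only [pvBadKeys, List.mem_cons, List.not_mem_nil, or_false] at hpre
  push Not at hpre
  obtain ⟨⟨l1, l2, l3, l4, l5, l6, l7⟩, ⟨r1, r2, r3, r4, r5, r6, r7⟩,
    ⟨c1, c2, c3, c4, c5, c6, c7⟩⟩ := hpre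
  have hl := pv_pos_eq l l1 l2 l3 l4 l5 l6 l7
  have hr := pv_pos_eq r r1 r2 r3 r4 r5 r6 r7
  have hc := pv_pos_eq c c1 c2 c3 c4 c5 c6 c7
  show pad_dist l r c = pad_dist_alt l r c
  simp only [pad_dist, pad_dist_alt]
  rw [pv_hstep l r c]
  simp only [hl.1, hl.2, hr.1, hr.2, hc.1, hc.2, beq_iff_eq, gt_iff_lt]
  split_ifs <;> first | rfl | (exfalso; omega)
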